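-- pv_equiv track=rewrite | github.com/0520hy/Algorithm | 프로그래머스/1/67256. ［카카오 인턴］ 키패드 누르기/［카카오 인턴］ 키패드 누르기.py | solution
-- ===== SOURCE A (Python) =====
-- def solution(numbers, hand):
--     left = [1, 4, 7, "*"]
--     mid = [2, 5, 8, 0]
--     right = [3, 6, 9, "#"]
--
--     l = "*"
--     r = "#"
--     answer = ''
--
--     hand = "R" if hand == "right" else "L"
--
--     for number in numbers:
--         if number in left:
--             answer += "L"
--             l = number
--         elif number in right:
--             answer += "R"
--             r = number
--         else:
--             left_dist = abs(mid.index(number) - mid.index(l)) if l in mid else abs(left.index(l) - mid.index(number)) + 1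
--             right_dist = abs(mid.index(number) - mid.index(r)) if r in mid else abs(right.index(r) - mid.index(number)) + 1
--
--             if left_dist < right_dist:
--                 answer += "L"
--                 l = number
--             elif left_dist > right_dist:
--                 answer += "R"
--                 r = number
--             else:
--                 answer += hand
--                 if hand == "L":
--                     l = number
--                 else:
--                     r = number
--
--     return answer
-- ===== SOURCE B (Python) =====
-- def solution(numbers, hand):
--     # Compile the problem into a finite transition table once: the thumbs' state
--     # is a pair of grid coordinates, and every (state, digit) transition is
--     # precomputed; the main loop is then a pure automaton run.
--     coord = {1: (0, 0), 2: (0, 1), 3: (0, 2),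
--              4: (1, 0), 5: (1, 1), 6: (1, 2),
--              7: (2, 0), 8: (2, 1), 9: (2, 2),
--              0: (3, 1)}
--     my = "R" if hand == "right" else "L"
--     lefts = [(3, 0)] + [coord[d] for d in (1, 4, 7, 2, 5, 8, 0)]
--     rights = [(3, 2)] + [coord[d] for d in (3, 6, 9, 2, 5, 8, 0)]
--     table = {}
--     for l in lefts:
--         for r in rights:
--             for n in range(10):
--                 p = coord[n]
--                 if p[1] == 0:
--                     t = ("L", p, r)
--                 elif p[1] == 2:
--                     t = ("R", l, p)
--                 else:
--                     dl = abs(p[0] - l[0]) + abs(p[1] - l[1])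
--                     dr = abs(p[0] - r[0]) + abs(p[1] - r[1])
--                     if dl < dr or (dl == dr and my == "L"):
--                         t = ("L", p, r)
--                     else:
--                         t = ("R", l, p)
--                 table[(l, r, n)] = t
--     out = []
--     l, r = (3, 0), (3, 2)
--     for n in numbers:
--         ch, l, r = table[(l, r, n)]
--         out.append(ch)
--     return "".join(out)
-- ===== Notes on version B (the rewrite author's own statement) =====
-- stated objective: alternative
-- what changed: B compiles the keypad into an explicit finite-state transition table (a dict mapping every reachable (left-thumb coordinate, right-thumb coordinate, digit) triple to the pressed letter and next state, built once by enumerating the 8x8x10 state space) and then runs the input as a pure automaton via table lookups, whereas A recomputes list.index-based distances with an in-mid case split for every number.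
import Mathlib
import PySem

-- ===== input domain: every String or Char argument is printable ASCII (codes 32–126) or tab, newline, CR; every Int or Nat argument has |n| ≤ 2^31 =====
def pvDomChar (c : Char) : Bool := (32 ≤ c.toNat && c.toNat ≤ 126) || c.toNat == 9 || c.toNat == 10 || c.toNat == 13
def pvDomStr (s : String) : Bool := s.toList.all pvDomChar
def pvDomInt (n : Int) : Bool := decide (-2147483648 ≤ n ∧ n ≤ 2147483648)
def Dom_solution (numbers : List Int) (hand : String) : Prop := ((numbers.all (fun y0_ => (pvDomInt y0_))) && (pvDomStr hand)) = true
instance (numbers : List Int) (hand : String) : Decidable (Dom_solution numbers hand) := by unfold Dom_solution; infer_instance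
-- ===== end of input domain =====

-- B compiles the keypad into a precomputed 640-entry transition table (a finite
-- automaton over thumb-coordinate states) and runs the input through pure table
-- lookups, instead of A's per-number list.index distance computation (objective: alternative).


-- ===== PORT A =====
-- A's thumb state is a keypad symbol: "*"/"#" (here: none) or a digit (here: some d).
-- mid.index(n); -1 stands for Python's ValueError, unreachable under Pre_solution
def midIdx (n : Int) : Int :=
  if n = 2 then 0 else if n = 5 then 1 else if n = 8 then 2 else if n = 0 then 3 else -1

-- l in mid / r in mid  (the initial "*"/"#" is none and is not in mid)
def inMid (x : Option Int) : Bool :=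
  match x with
  | some v => v = 2 || v = 5 || v = 8 || v = 0
  | none => false

-- mid.index(l) for the 'l in mid' branch
def midIdxO (x : Option Int) : Int :=
  match x with
  | some v => midIdx v
  | none => -1

-- left.index(l): left = [1, 4, 7, "*"]; "*" is none
def leftIdx (x : Option Int) : Int :=
  match x with
  | none => 3
  | some v => if v = 1 then 0 else if v = 4 then 1 else if v = 7 then 2 else -1

-- right.index(r): right = [3, 6, 9, "#"]; "#" is none
def rightIdx (x : Option Int) : Int :=
  match x with
  | none => 3
  | some v => if v = 3 then 0 else if v = 6 then 1 else if v = 9 then 2 else -1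

-- the for-loop of A, state (l, r, answer)
def solutionLoop (hand : String) : List Int → Option Int → Option Int → String → String
  | [], _, _, answer => answer
  | number :: rest, l, r, answer =>
    if number ∈ ([1, 4, 7] : List Int) then      -- number in left (an int never equals "*")
      solutionLoop hand rest (some number) r (answer ++ "L")
    else if number ∈ ([3, 6, 9] : List Int) then -- number in right
      solutionLoop hand rest l (some number) (answer ++ "R")
    else
      let left_dist : Int :=
        if inMid l then |midIdx number - midIdxO l| else |leftIdx l - midIdx number| + 1
      let right_dist : Int :=
        if inMid r then |midIdx number - midIdxO r| else |rightIdx r - midIdx number| + 1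
      if left_dist < right_dist then
        solutionLoop hand rest (some number) r (answer ++ "L")
      else if left_dist > right_dist then
        solutionLoop hand rest l (some number) (answer ++ "R")
      else
        if hand = "L" then
          solutionLoop hand rest (some number) r (answer ++ hand)
        else
          solutionLoop hand rest l (some number) (answer ++ hand)

def solution (numbers : List Int) (hand : String) : String :=
  solutionLoop (if hand = "right" then "R" else "L") numbers none none ""

-- ===== PORT B =====
-- coord[n] of Source B: the (row, col) of digit n; the default (0,0) stands for
-- Python's KeyError on a non-digit key, unreachable under Pre_solution
def coordB (n : Int) : Int × Int :=
  if n = 1 then (0, 0) else if n = 2 then (0, 1) else if n = 3 then (0, 2)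
  else if n = 4 then (1, 0) else if n = 5 then (1, 1) else if n = 6 then (1, 2)
  else if n = 7 then (2, 0) else if n = 8 then (2, 1) else if n = 9 then (2, 2)
  else if n = 0 then (3, 1) else (0, 0)

def leftsB : List (Int × Int) := (3, 0) :: ([1, 4, 7, 2, 5, 8, 0] : List Int).map coordB
def rightsB : List (Int × Int) := (3, 2) :: ([3, 6, 9, 2, 5, 8, 0] : List Int).map coordB

-- the body of Source B's table-building loop: the entry stored at table[(l, r, n)]
def entryB (my : String) (l r : Int × Int) (n : Int) :
    String × (Int × Int) × (Int × Int) :=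
  let p := coordB n
  if p.2 = 0 then ("L", p, r)
  else if p.2 = 2 then ("R", l, p)
  else
    let dl : Int := |p.1 - l.1| + |p.2 - l.2|
    let dr : Int := |p.1 - r.1| + |p.2 - r.2|
    if dl < dr ∨ (dl = dr ∧ my = "L") then ("L", p, r) else ("R", l, p)

-- the nested table-building loops of Source B
def tableB (my : String) :
    PySem.Dict ((Int × Int) × (Int × Int) × Int) (String × (Int × Int) × (Int × Int)) :=
  leftsB.foldl (fun d l =>
    rightsB.foldl (fun d r =>
      (PySem.List.pyRange 0 10 1).foldl (fun d n =>
        d.insert (l, r, n) (entryB my l r n)) d) d) PySem.Dict.empty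

-- the main loop of Source B: a pure automaton run over the table; none = KeyError,
-- unreachable under Pre_solution
def runB (table : PySem.Dict ((Int × Int) × (Int × Int) × Int) (String × (Int × Int) × (Int × Int))) :
    List Int → Int × Int → Int × Int → List String → List String
  | [], _, _, out => out
  | n :: rest, l, r, out =>
    match table.get? (l, r, n) with
    | some (ch, l2, r2) => runB table rest l2 r2 (out ++ [ch])
    | none => out

def solution_alt (numbers : List Int) (hand : String) : String :=
  let my := if hand = "right" then "R" else "L"
  String.join (runB (tableB my) numbers (3, 0) (3, 2) [])

-- ===== PRECONDITION & SPEC =====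
-- Pre_ excludes numbers outside 0..9: there A raises ValueError (mid.index) and B raises KeyError.
def Pre_solution (numbers : List Int) (hand : String) : Prop :=
  ∀ n ∈ numbers, 0 ≤ n ∧ n ≤ 9
instance (numbers : List Int) (hand : String) : Decidable (Pre_solution numbers hand) := by
  unfold Pre_solution; infer_instance
def pvWitness_solution : List Int × String := ([1, 3, 4, 5, 8, 2, 1, 4, 5, 9, 5], "right")

def Spec_solution (numbers : List Int) (hand : String) (out : String) : Prop := out = solution_alt numbers hand
instance (numbers : List Int) (hand : String) (out : String) : Decidable (Spec_solution numbers hand out) := by unfold Spec_solution; infer_instance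

-- ===== CLAIM (what is proved, stated in full; the proofs are below) =====
def Claim_equal_solution : Prop := ∀ (numbers : List Int) (hand : String), Dom_solution numbers hand → Pre_solution numbers hand → Spec_solution numbers hand (solution numbers hand)

-- ===== LEMMAS AND PROOFS =====

-- the values A's l / r state can take (initial "*"/"#" = none, then left/right/mid digits)
def LSet : List (Option Int) := [none, some 1, some 4, some 7, some 2, some 5, some 8, some 0]
def RSet : List (Option Int) := [none, some 3, some 6, some 9, some 2, some 5, some 8, some 0]

-- B's coordinate for an A-state
def coordL (x : Option Int) : Int × Int :=
  match x with | none => (3, 0) | some v => coordB v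
def coordR (x : Option Int) : Int × Int :=
  match x with | none => (3, 2) | some v => coordB v

-- one iteration of A's loop body: (appended string, new l, new r)
def stepA (hand : String) (l r : Option Int) (number : Int) :
    String × Option Int × Option Int :=
  if number ∈ ([1, 4, 7] : List Int) then ("L", some number, r)
  else if number ∈ ([3, 6, 9] : List Int) then ("R", l, some number)
  else
    let left_dist : Int :=
      if inMid l then |midIdx number - midIdxO l| else |leftIdx l - midIdx number| + 1
    let right_dist : Int :=
      if inMid r then |midIdx number - midIdxO r| else |rightIdx r - midIdx number| + 1
    if left_dist < right_dist then ("L", some number, r)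
    else if left_dist > right_dist then ("R", l, some number)
    else if hand = "L" then (hand, some number, r)
    else (hand, l, some number)

theorem loopA_cons (hand : String) (n : Int) (rest : List Int) (l r : Option Int) (ans : String) :
    solutionLoop hand (n :: rest) l r ans =
      solutionLoop hand rest (stepA hand l r n).2.1 (stepA hand l r n).2.2
        (ans ++ (stepA hand l r n).1) := by
  simp only [solutionLoop, stepA]
  split_ifs <;> rfl

theorem join_append_single (out : List String) (s : String) :
    String.join (out ++ [s]) = String.join out ++ s := by
  simp [String.join, List.foldl_append]

-- the full key list of the table, in insertion order
def keysB : List ((Int × Int) × (Int × Int) × Int) :=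
  leftsB.flatMap (fun l => rightsB.flatMap (fun r =>
    (PySem.List.pyRange 0 10 1).map (fun n => (l, r, n))))

theorem tableB_eq_fold (my : String) :
    tableB my = keysB.foldl (fun d k => d.insert k (entryB my k.1 k.2.1 k.2.2)) PySem.Dict.empty := by
  simp only [tableB, keysB, List.foldl_flatMap, List.foldl_map]

theorem keysB_eq_product :
    keysB = leftsB ×ˢ (rightsB ×ˢ PySem.List.pyRange 0 10 1) := by
  show keysB = leftsB.flatMap fun l => ((rightsB.flatMap fun r =>
    (PySem.List.pyRange 0 10 1).map (Prod.mk r)).map (Prod.mk l))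
  simp only [keysB, List.map_flatMap, List.map_map]
  rfl

theorem keysB_nodup : keysB.Nodup := by
  rw [keysB_eq_product]
  exact List.Nodup.product (by decide) (List.Nodup.product (by decide) (by decide))

theorem tableB_items (my : String) :
    (tableB my).items = keysB.map (fun k => (k, entryB my k.1 k.2.1 k.2.2)) := by
  rw [tableB_eq_fold]
  have h := PySem.Dict.items_foldl_insert_fresh
    (l := keysB) (k := fun a => a) (v := fun a => entryB my a.1 a.2.1 a.2.2)
    (d := PySem.Dict.empty)
    (by intro a _; simp [PySem.Dict.contains_empty])
    (by simpa using keysB_nodup)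
  simpa using h

set_option maxRecDepth 10000 in
theorem tableB_get? (my : String) (k : (Int × Int) × (Int × Int) × Int) (hk : k ∈ keysB) :
    (tableB my).get? k = some (entryB my k.1 k.2.1 k.2.2) := by
  apply PySem.Dict.get?_of_mem_items
  · rw [tableB_items]
    exact List.mem_map_of_mem hk
  · have hkeys : (tableB my).keys = keysB := by
      simp only [PySem.Dict.keys, tableB_items, List.map_map]
      exact List.map_id keysB
    rw [hkeys]
    exact keysB_nodup

-- the key reached from A-states and a digit is in the table
theorem coordL_mem : ∀ l ∈ LSet, coordL l ∈ leftsB := by decide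
theorem coordR_mem : ∀ r ∈ RSet, coordR r ∈ rightsB := by decide
theorem digit_mem : ∀ n ∈ ([0,1,2,3,4,5,6,7,8,9] : List Int), n ∈ PySem.List.pyRange 0 10 1 := by decide

theorem key_mem (l : Option Int) (hl : l ∈ LSet) (r : Option Int) (hr : r ∈ RSet)
    (n : Int) (hn : n ∈ ([0,1,2,3,4,5,6,7,8,9] : List Int)) :
    (coordL l, coordR r, n) ∈ keysB :=
  List.mem_flatMap.2 ⟨_, coordL_mem l hl,
    List.mem_flatMap.2 ⟨_, coordR_mem r hr, List.mem_map_of_mem (digit_mem n hn)⟩⟩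

-- A's loop body and B's table entry agree on every reachable state and digit,
-- and A's new state stays in LSet/RSet (finite check)
set_option maxRecDepth 100000 in
set_option maxHeartbeats 4000000 in
theorem step_ok : ∀ my ∈ (["L", "R"] : List String), ∀ l ∈ LSet, ∀ r ∈ RSet,
    ∀ n ∈ ([0,1,2,3,4,5,6,7,8,9] : List Int),
    entryB my (coordL l) (coordR r) n =
      ((stepA my l r n).1, coordL (stepA my l r n).2.1, coordR (stepA my l r n).2.2) ∧
    (stepA my l r n).2.1 ∈ LSet ∧ (stepA my l r n).2.2 ∈ RSet := by decide

theorem loops_agree (my : String) (hmy : my ∈ (["L", "R"] : List String)) :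
    ∀ (ns : List Int), (∀ n ∈ ns, 0 ≤ n ∧ n ≤ 9) →
    ∀ (lA rA : Option Int), lA ∈ LSet → rA ∈ RSet →
    ∀ (ans : String) (out : List String), ans = String.join out →
    solutionLoop my ns lA rA ans =
      String.join (runB (tableB my) ns (coordL lA) (coordR rA) out) := by
  intro ns
  induction ns with
  | nil =>
    intro _ lA rA _ _ ans out hout
    simpa [solutionLoop, runB] using hout
  | cons n rest ih =>
    intro hpre lA rA hl hr ans out hout
    have hn : n ∈ ([0,1,2,3,4,5,6,7,8,9] : List Int) := by
      have := hpre n (by simp)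
      have h1 := this.1; have h2 := this.2
      interval_cases n <;> decide
    have hrest : ∀ m ∈ rest, 0 ≤ m ∧ m ≤ 9 := fun m hm => hpre m (by simp [hm])
    obtain ⟨hent, hml, hmr⟩ := step_ok my hmy lA hl rA hr n hn
    have hget := tableB_get? my (coordL lA, coordR rA, n) (key_mem lA hl rA hr n hn)
    rw [loopA_cons]
    show solutionLoop my rest _ _ _ = String.join (runB (tableB my) (n :: rest) _ _ out)
    rw [runB, hget, hent]
    exact ih hrest _ _ hml hmr _ (out ++ [(stepA my lA rA n).1])
      (by rw [join_append_single, hout])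

-- ===== VERDICT (by name: the statement is the Claim_ definition above) =====
theorem solution_spec : Claim_equal_solution := by
  intro numbers hand _ hpre
  unfold Spec_solution solution solution_alt
  exact loops_agree _ (by split_ifs <;> simp) numbers hpre none none (by decide) (by decide) "" [] rfl
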